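-- pv_equiv track=rewrite | github.com/tmackall/tmac-air | gmail-cli/gmail_cleanup.py | domain_to_label
-- ===== SOURCE A (Python) =====
-- def domain_to_label(domain):
--     """Convert a sender domain like 'mail.amazon.com' to a readable label like 'Amazon'."""
--     prefixes = [
--         'mail.', 'email.', 'notifications.', 'notification.', 'alerts.', 'alert.',
--         'noreply.', 'no-reply.', 'info.', 'news.', 'newsletter.', 'hello.', 'hi.',
--         'support.', 'service.', 'updates.', 'update.', 'notify.', 'mailer.',
--         'messages.', 'message.', 'reply.', 'do-not-reply.',
--     ]
--     cleaned = domain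
--     for prefix in prefixes:
--         if cleaned.startswith(prefix):
--             cleaned = cleaned[len(prefix):]
--             break
--     # Take the first segment before the TLD(s)
--     parts = cleaned.split('.')
--     name = parts[0] if parts else cleaned
--     return name.capitalize()
-- ===== SOURCE B (Python) =====
-- WORDS = set(
--     'mail email notifications notification alerts alert noreply no-reply '
--     'info news newsletter hello hi support service updates update notify '
--     'mailer messages message reply do-not-reply'.split()
-- )
--
--
-- def domain_to_label(domain):
--     """Convert a sender domain like 'mail.amazon.com' to a readable label like 'Amazon'."""
--     head, sep, rest = domain.partition('.')
--     if sep and head in WORDS: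
--         head = rest.partition('.')[0]
--     return head.capitalize()
-- ===== Notes on version B (the rewrite author's own statement) =====
-- stated objective: simpler
-- what changed: Replaces A's sequential startswith-loop-with-break over 23 dotted prefix strings (plus slicing and a full split) by at most two str.partition calls on the dot: take the text before the first dot, and only when it is a known prefix word (single set lookup) take the next dot-delimited segment instead.
import Mathlib
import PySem

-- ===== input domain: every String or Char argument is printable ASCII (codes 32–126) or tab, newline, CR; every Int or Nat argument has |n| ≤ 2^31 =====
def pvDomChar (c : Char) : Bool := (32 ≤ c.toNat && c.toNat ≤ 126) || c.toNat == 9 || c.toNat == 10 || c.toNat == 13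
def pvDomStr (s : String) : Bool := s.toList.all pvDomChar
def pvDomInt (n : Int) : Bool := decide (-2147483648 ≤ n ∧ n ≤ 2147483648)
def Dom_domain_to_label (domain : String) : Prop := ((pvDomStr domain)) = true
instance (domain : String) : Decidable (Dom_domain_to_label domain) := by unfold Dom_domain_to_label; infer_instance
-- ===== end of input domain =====

-- B replaces A's sequential startswith-loop-with-break over 23 dotted prefixes (plus a full
-- split) by at most two str.partition calls on the dot and a single set lookup (objective: simpler).

-- shared primitive: Python str.capitalize() (exact on ASCII: first char uppercased, rest lowered)
def pvCapitalize : List Char → List Char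
  | [] => []
  | c :: r => PySem.Chars.upperChar c :: PySem.Chars.lower r

-- ===== PORT A =====
def pvPrefixesA : List (List Char) :=
  ["mail.".toList, "email.".toList, "notifications.".toList, "notification.".toList,
   "alerts.".toList, "alert.".toList, "noreply.".toList, "no-reply.".toList,
   "info.".toList, "news.".toList, "newsletter.".toList, "hello.".toList, "hi.".toList,
   "support.".toList, "service.".toList, "updates.".toList, "update.".toList,
   "notify.".toList, "mailer.".toList, "messages.".toList, "message.".toList,
   "reply.".toList, "do-not-reply.".toList]

-- A's for-loop with break: try each prefix in order, strip the first that matches and stop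
def pvStripLoop : List (List Char) → List Char → List Char
  | [], s => s
  | p :: ps, s =>
      if PySem.Chars.startswith s p then PySem.List.slice s (some (p.length : Int)) none
      else pvStripLoop ps s

def domain_to_label (domain : String) : String :=
  let cleaned := pvStripLoop pvPrefixesA domain.toList
  let parts := PySem.Chars.splitOn cleaned ['.']
  let name := match parts with
    | [] => cleaned           -- 'parts[0] if parts else cleaned'
    | n :: _ => n
  String.ofList (pvCapitalize name)

-- ===== PORT B =====
-- WORDS = set('mail email … do-not-reply'.split())  (split on and built once from one string)
def pvWordsB : PySem.Set (List Char) :=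
  PySem.Set.ofList (PySem.Chars.splitOn
    ("mail email notifications notification alerts alert noreply no-reply " ++
     "info news newsletter hello hi support service updates update notify " ++
     "mailer messages message reply do-not-reply").toList [' '])

-- exact hand port of Python's str.partition on the dot: (before, found-a-dot?, after)
def pvPartition : List Char → List Char × Bool × List Char
  | [] => ([], false, [])
  | c :: r =>
      if c = '.' then ([], true, r)
      else
        let p := pvPartition r
        (c :: p.1, p.2.1, p.2.2)

def domain_to_label_alt (domain : String) : String :=
  let p := pvPartition domain.toList                      -- head, sep, rest = domain.partition('.')
  let head :=
    if p.2.1 && PySem.Set.contains pvWordsB p.1           -- if sep and head in WORDS: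
    then (pvPartition p.2.2).1                            --     head = rest.partition('.')[0]
    else p.1
  String.ofList (pvCapitalize head)

-- ===== PRECONDITION & SPEC =====
def Spec_domain_to_label (domain : String) (out : String) : Prop := out = domain_to_label_alt domain
instance (domain : String) (out : String) : Decidable (Spec_domain_to_label domain out) := by unfold Spec_domain_to_label; infer_instance

-- ===== CLAIM (what is proved, stated in full; the proofs are below) =====
def Claim_equal_domain_to_label : Prop := ∀ (domain : String), Dom_domain_to_label domain → Spec_domain_to_label domain (domain_to_label domain)

-- ===== LEMMAS AND PROOFS =====

-- the 23 bare prefix words, used only by the proofs to bridge the two ports' tables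
def pvWordsPf : List (List Char) :=
  ["mail".toList, "email".toList, "notifications".toList, "notification".toList,
   "alerts".toList, "alert".toList, "noreply".toList, "no-reply".toList,
   "info".toList, "news".toList, "newsletter".toList, "hello".toList, "hi".toList,
   "support".toList, "service".toList, "updates".toList, "update".toList,
   "notify".toList, "mailer".toList, "messages".toList, "message".toList,
   "reply".toList, "do-not-reply".toList]

-- a simple structural model of splitting on the dot character
def pvSplit : List Char → List (List Char)
  | [] => [[]]
  | c :: r => if c = '.' then [] :: pvSplit r else (pvSplit r).modifyHead (c :: ·)

-- joining the pieces back with '.'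
def pvJoin : List (List Char) → List Char
  | [] => []
  | [p] => p
  | p :: q :: r => p ++ '.' :: pvJoin (q :: r)

theorem pvSplit_ne_nil (s : List Char) : pvSplit s ≠ [] := by
  induction s with
  | nil => simp [pvSplit]
  | cons c r ih =>
      simp only [pvSplit]
      split
      · simp
      · cases h : pvSplit r with
        | nil => exact absurd h ih
        | cons a t => simp [List.modifyHead]

theorem splitOn_go_char (fuel : Nat) :
    ∀ (l cur : List Char) (acc : List (List Char)), l.length < fuel →
      PySem.Chars.splitOn.go ['.'] fuel l cur acc =
        acc.reverse ++ (cur.reverse ++ (pvSplit l).headI) :: (pvSplit l).tail := by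
  induction fuel with
  | zero => intro l cur acc h; omega
  | succ fuel ih =>
      intro l cur acc h
      cases l with
      | nil =>
          simp [PySem.Chars.splitOn.go, pvSplit]
      | cons c rest =>
          rw [PySem.Chars.splitOn.go]
          by_cases hc : c = '.'
          · subst hc
            rw [if_pos (by simp [List.isPrefixOf])]
            simp only [List.length_cons, List.length_nil, List.drop_succ_cons, List.drop_zero]
            rw [ih rest [] (cur.reverse :: acc) (by simp at h; omega)]
            cases hr : pvSplit rest with
            | nil => exact absurd hr (pvSplit_ne_nil rest)
            | cons a t => simp [pvSplit, hr]
          · have hpre : List.isPrefixOf ['.'] (c :: rest) = false := by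
              simp only [List.isPrefixOf, Bool.and_true,
                beq_eq_false_iff_ne, ne_eq]
              exact fun hh => hc hh.symm
            rw [if_neg (by simp [hpre])]
            rw [ih rest (c :: cur) acc (by simp at h; omega)]
            cases hr : pvSplit rest with
            | nil => exact absurd hr (pvSplit_ne_nil rest)
            | cons a t => simp [pvSplit, hc, hr, List.modifyHead]

theorem splitOn_eq_pvSplit (s : List Char) :
    PySem.Chars.splitOn s ['.'] = pvSplit s := by
  unfold PySem.Chars.splitOn
  rw [splitOn_go_char (s.length + 1) s [] [] (by omega)]
  cases hr : pvSplit s with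
  | nil => exact absurd hr (pvSplit_ne_nil s)
  | cons a t => simp

theorem pvSplit_no_dot (s : List Char) : ∀ p ∈ pvSplit s, ('.' : Char) ∉ p := by
  induction s with
  | nil => simp [pvSplit]
  | cons c r ih =>
      intro p hp
      by_cases hc : c = '.'
      · subst hc
        have hp' : p = [] ∨ p ∈ pvSplit r := by simpa [pvSplit] using hp
        rcases hp' with rfl | hp'
        · simp
        · exact ih p hp'
      · cases hr : pvSplit r with
        | nil => exact absurd hr (pvSplit_ne_nil r)
        | cons a t =>
            simp only [pvSplit, if_neg hc, hr, List.modifyHead, List.mem_cons] at hp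
            rcases hp with rfl | hp
            · intro hmem
              rcases List.mem_cons.mp hmem with h1 | h1
              · exact hc h1.symm
              · exact ih a (by rw [hr]; exact List.mem_cons_self ..) h1
            · exact ih p (by rw [hr]; exact List.mem_cons_of_mem a hp)

theorem pvSplit_of_no_dot (w : List Char) (h : ('.' : Char) ∉ w) : pvSplit w = [w] := by
  induction w with
  | nil => simp [pvSplit]
  | cons c r ih =>
      have hc : ¬ c = '.' := by rintro rfl; exact h (by simp)
      have h2 : ('.' : Char) ∉ r := fun hh => h (by simp [hh])
      simp [pvSplit, hc, ih h2, List.modifyHead]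

theorem pvSplit_append_dot (w r : List Char) (h : ('.' : Char) ∉ w) :
    pvSplit (w ++ '.' :: r) = w :: pvSplit r := by
  induction w with
  | nil => simp [pvSplit]
  | cons c t ih =>
      have hc : ¬ c = '.' := by rintro rfl; exact h (by simp)
      have h2 : ('.' : Char) ∉ t := fun hh => h (by simp [hh])
      simp [pvSplit, hc, ih h2, List.modifyHead]

theorem pvJoin_pvSplit (s : List Char) : pvJoin (pvSplit s) = s := by
  induction s with
  | nil => simp [pvSplit, pvJoin]
  | cons c r ih =>
      simp only [pvSplit]
      by_cases hc : c = '.'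
      · subst hc
        cases hr : pvSplit r with
        | nil => exact absurd hr (pvSplit_ne_nil r)
        | cons a t =>
            rw [hr] at ih
            simp [pvJoin, ih]
      · rw [if_neg hc]
        cases hr : pvSplit r with
        | nil => exact absurd hr (pvSplit_ne_nil r)
        | cons a t =>
            rw [hr] at ih
            cases t with
            | nil => simpa [pvJoin, List.modifyHead] using congrArg (c :: ·) ih
            | cons q t' => simpa [pvJoin, List.modifyHead] using congrArg (c :: ·) ih

theorem pvSplit_pvJoin (parts : List (List Char)) (hne : parts ≠ [])
    (h : ∀ p ∈ parts, ('.' : Char) ∉ p) : pvSplit (pvJoin parts) = parts := by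
  induction parts with
  | nil => exact absurd rfl hne
  | cons p ps ih =>
      cases ps with
      | nil => simp [pvJoin, pvSplit_of_no_dot p (h p (by simp))]
      | cons q r =>
          have : pvJoin (p :: q :: r) = p ++ '.' :: pvJoin (q :: r) := rfl
          rw [this, pvSplit_append_dot p _ (h p (by simp))]
          rw [ih (by simp) (fun x hx => h x (by simp [hx]))]

-- startswith with a dotless word followed by '.' ↔ s literally decomposes as w ++ '.' ++ r
theorem startswith_dot_iff (w s : List Char) :
    PySem.Chars.startswith s (w ++ ['.']) = true ↔ ∃ r, s = w ++ '.' :: r := by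
  rw [PySem.Chars.startswith_iff]
  constructor
  · rintro ⟨t, ht⟩
    exact ⟨t, by simp [← ht]⟩
  · rintro ⟨r, rfl⟩
    exact ⟨r, by simp⟩

-- characterisation of A's prefix loop over words-with-a-trailing-dot
theorem pvStripLoop_char (ws : List (List Char)) (s : List Char)
    (h : ∀ w ∈ ws, ('.' : Char) ∉ w) :
    pvStripLoop (ws.map (· ++ ['.'])) s =
      match pvSplit s with
      | p0 :: p1 :: tl => if p0 ∈ ws then pvJoin (p1 :: tl) else s
      | _ => s := by
  induction ws with
  | nil =>
      simp only [List.map_nil, pvStripLoop]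
      cases hs : pvSplit s with
      | nil => rfl
      | cons p0 rest => cases rest <;> simp
  | cons w ws' ih =>
      have hw : ('.' : Char) ∉ w := h w (by simp)
      simp only [List.map_cons, pvStripLoop]
      by_cases hsw : PySem.Chars.startswith s (w ++ ['.']) = true
      · rw [if_pos hsw]
        obtain ⟨r, rfl⟩ := (startswith_dot_iff w s).mp hsw
        rw [pvSplit_append_dot w r hw]
        cases hr : pvSplit r with
        | nil => exact absurd hr (pvSplit_ne_nil r)
        | cons p1 tl =>
            simp only [List.mem_cons, true_or, if_pos]
            rw [← hr, pvJoin_pvSplit]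
            rw [PySem.List.slice_from _ (by positivity)]
            simp
      · rw [if_neg (by simpa using hsw)]
        rw [ih (fun x hx => h x (by simp [hx]))]
        cases hs : pvSplit s with
        | nil => rfl
        | cons p0 rest =>
            cases rest with
            | nil => rfl
            | cons p1 tl =>
                have hne : p0 ≠ w := by
                  rintro rfl
                  apply hsw
                  rw [startswith_dot_iff]
                  refine ⟨pvJoin (p1 :: tl), ?_⟩
                  conv_lhs => rw [← pvJoin_pvSplit s, hs]
                  rfl
                simp [hne]

-- B's partition('.') against the split model: first component is the head of the split …
theorem pvPartition_fst (s : List Char) : (pvPartition s).1 = (pvSplit s).headI := by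
  induction s with
  | nil => simp [pvPartition, pvSplit]
  | cons c r ih =>
      by_cases hc : c = '.'
      · simp [pvPartition, pvSplit, hc]
      · cases hr : pvSplit r with
        | nil => exact absurd hr (pvSplit_ne_nil r)
        | cons a t =>
            rw [hr] at ih
            simp [pvPartition, pvSplit, hc, hr, List.modifyHead, ih]

-- … and the separator flag with the remainder recover the rest of the split
theorem pvPartition_split (s : List Char) :
    ((pvPartition s).2.1 = false ∧ (pvPartition s).1 = s ∧ pvSplit s = [s]) ∨
    ((pvPartition s).2.1 = true ∧ pvSplit s = (pvPartition s).1 :: pvSplit (pvPartition s).2.2) := by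
  induction s with
  | nil => exact Or.inl ⟨rfl, rfl, rfl⟩
  | cons c r ih =>
      by_cases hc : c = '.'
      · exact Or.inr ⟨by simp [pvPartition, hc], by simp [pvSplit, pvPartition, hc]⟩
      · rcases ih with ⟨hf, hv, hs⟩ | ⟨ht, hs⟩
        · refine Or.inl ⟨by simp [pvPartition, hc, hf], by simp [pvPartition, hc, hf, hv], ?_⟩
          simp [pvSplit, hc, hs, List.modifyHead]
        · refine Or.inr ⟨by simp [pvPartition, hc, ht], ?_⟩
          simp [pvSplit, hc, hs, List.modifyHead, pvPartition]

theorem words_no_dot : ∀ w ∈ pvWordsPf, ('.' : Char) ∉ w := by decide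

theorem prefixes_eq : pvPrefixesA = pvWordsPf.map (· ++ ['.']) := by decide

set_option maxRecDepth 8000 in
theorem wordsB_eq : pvWordsB = PySem.Set.ofList pvWordsPf := by rfl

-- ===== VERDICT (by name: the statement is the Claim_ definition above) =====
set_option maxRecDepth 2000 in
theorem domain_to_label_spec : Claim_equal_domain_to_label := by
  intro domain _
  unfold Spec_domain_to_label domain_to_label domain_to_label_alt
  simp only [splitOn_eq_pvSplit, prefixes_eq, wordsB_eq]
  rw [pvStripLoop_char pvWordsPf domain.toList words_no_dot]
  rcases pvPartition_split domain.toList with ⟨hf, hv, hs⟩ | ⟨ht, hs⟩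
  · simp [hs, hf, hv]
  · rcases hP : pvPartition domain.toList with ⟨h0, sep, rest⟩
    rw [hP] at ht hs
    simp only at ht hs
    subst ht
    cases hr : pvSplit rest with
    | nil => exact absurd hr (pvSplit_ne_nil _)
    | cons p1 tl =>
        rw [hr] at hs
        have hfst : (pvPartition rest).1 = p1 := by rw [pvPartition_fst, hr]; rfl
        by_cases hmem : h0 ∈ pvWordsPf
        · have hdot : ∀ q ∈ (p1 :: tl), ('.' : Char) ∉ q := fun q hq =>
            pvSplit_no_dot domain.toList q (by rw [hs]; exact List.mem_cons_of_mem _ hq)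
          have hjoin : pvSplit (pvJoin (p1 :: tl)) = p1 :: tl :=
            pvSplit_pvJoin (p1 :: tl) (by simp) hdot
          simp [hs, hjoin, hfst, hmem,
            PySem.Set.contains_eq_listContains, List.contains_eq_mem, PySem.Set.mem_ofList]
        · simp [hs, hmem,
            PySem.Set.contains_eq_listContains, List.contains_eq_mem, PySem.Set.mem_ofList]
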